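-- pv_equiv track=rewrite | github.com/arthur-stammet/Pisano-Visualizer | pisano_visualizer.py | pisano_mirror
-- ===== SOURCE A (Python) =====
-- def pisano_mirror(m):
--     a, b, c = 0, 1, 2
--     mirror = 0
--     mirror_seq = [1, m - 1, 0]
--     ex_seq = [m - 1, 1, 0]
--     while c <= 100000:
--         d = (a + b) % m
--         end_seq = [a, b, d]
--         a, b, c = b, d, c + 1
--         if end_seq == mirror_seq:
--             mirror += 1
--         if end_seq == ex_seq:
--             break
--     return mirror
-- ===== SOURCE B (Python) =====
-- def _first_index(triples, pat):
--     for i, t in enumerate(triples):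
--         if t == pat:
--             return i
--     return None
--
--
-- def pisano_mirror(m):
--     # Materialize the Fibonacci-mod-m value list (v[0]=0, v[1]=1 unreduced),
--     # then scan its consecutive triples: find the stop index (first exit
--     # triple, or the last triple if none), and count mirror triples up to
--     # and including the stop index.
--     v = []
--     a, b = 0, 1
--     for _ in range(100001):
--         v.append(a)
--         a, b = b, (a + b) % m
--     triples = [list(t) for t in zip(v, v[1:], v[2:])]
--     idx = _first_index(triples, [m - 1, 1, 0])
--     stop = idx if idx is not None else len(triples) - 1
--     return triples[:stop + 1].count([1, m - 1, 0])
-- ===== Notes on version B (the rewrite author's own statement) =====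
-- stated objective: alternative
-- what changed: A's single fused while-loop with inline counting and an early break is replaced by materialize-then-scan: B builds the Fibonacci-mod-m value list once, zips it into the consecutive triples up to A's iteration cap, finds the stop index (first exit triple, else last), and counts mirror triples in the slice up to and including it.
-- outside the precondition, e.g. on pisano_mirror(0): A raises ZeroDivisionError, B raises ZeroDivisionError
import Mathlib
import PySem

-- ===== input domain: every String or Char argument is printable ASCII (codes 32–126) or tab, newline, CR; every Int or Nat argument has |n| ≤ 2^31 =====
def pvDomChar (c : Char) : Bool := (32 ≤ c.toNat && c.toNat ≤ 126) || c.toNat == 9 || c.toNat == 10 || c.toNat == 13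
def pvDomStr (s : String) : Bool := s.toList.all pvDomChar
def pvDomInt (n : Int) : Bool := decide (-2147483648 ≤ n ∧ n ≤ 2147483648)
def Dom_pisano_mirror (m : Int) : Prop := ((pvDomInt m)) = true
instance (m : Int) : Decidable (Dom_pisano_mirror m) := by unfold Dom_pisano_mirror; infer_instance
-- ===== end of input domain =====

-- B replaces A's single fused scan-with-break by materialize-then-two-passes
-- (build the value list, find the stop index, count a slice); alternative
-- decomposition, same asymptotic cost.

-- ===== PORT A =====
-- A's while loop: c runs 2..100000, i.e. 99999 iterations unless the break fires.
def pvALoop (m a b : Int) (fuel : Nat) (mirror : Int) : Int :=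
  match fuel with
  | 0 => mirror
  | Nat.succ n =>
    let d := PySem.Int.mod (a + b) m
    let endSeq : List Int := [a, b, d]
    let mirror' := if endSeq = [1, m - 1, 0] then mirror + 1 else mirror
    if endSeq = [m - 1, 1, 0] then mirror'
    else pvALoop m b d n mirror'

def pisano_mirror (m : Int) : Int := pvALoop m 0 1 99999 0

-- ===== PORT B =====
-- the append loop building v, carried with a cons-accumulator reversed at the end
def pvGenV (m a b : Int) (fuel : Nat) (acc : List Int) : List Int :=
  match fuel with
  | 0 => acc.reverse
  | Nat.succ n => pvGenV m b (PySem.Int.mod (a + b) m) n (a :: acc)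

-- [list(t) for t in zip(v, v[1:], v[2:])], built front-to-back with an accumulator
def pvZip3Go : List Int → List Int → List Int → List (List Int) → List (List Int)
  | x :: xs, y :: ys, z :: zs, acc => pvZip3Go xs ys zs ([x, y, z] :: acc)
  | _, _, _, acc => acc.reverse

def pvZip3 (xs ys zs : List Int) : List (List Int) := pvZip3Go xs ys zs []

-- _first_index: enumerate-style scan carrying the running index i
def pvFIGo : List (List Int) → List Int → Nat → Option Nat
  | [], _, _ => none
  | t :: rest, pat, i => if t = pat then some i else pvFIGo rest pat (i + 1)

def pvFirstIndex (triples : List (List Int)) (pat : List Int) : Option Nat :=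
  pvFIGo triples pat 0

def pisano_mirror_alt (m : Int) : Int :=
  let v := pvGenV m 0 1 100001 []
  let triples := pvZip3 v (v.drop 1) (v.drop 2)
  let idx := pvFirstIndex triples [m - 1, 1, 0]
  let stop : Nat := match idx with | some i => i | none => triples.length - 1
  ((triples.take (stop + 1)).count [1, m - 1, 0] : Int)

-- ===== PRECONDITION & SPEC =====
-- Pre_ excludes exactly m = 0, where Python's '%' raises ZeroDivisionError in both programs.
def Pre_pisano_mirror (m : Int) : Prop := m ≠ 0
instance (m : Int) : Decidable (Pre_pisano_mirror m) := by unfold Pre_pisano_mirror; infer_instance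

def pvWitness_pisano_mirror : Int := 10

def Spec_pisano_mirror (m : Int) (out : Int) : Prop := out = pisano_mirror_alt m
instance (m : Int) (out : Int) : Decidable (Spec_pisano_mirror m out) := by unfold Spec_pisano_mirror; infer_instance

-- ===== CLAIM (what is proved, stated in full; the proofs are below) =====
def Claim_equal_pisano_mirror : Prop := ∀ (m : Int), Dom_pisano_mirror m → Pre_pisano_mirror m → Spec_pisano_mirror m (pisano_mirror m)

-- ===== LEMMAS AND PROOFS =====

-- proof-side abstractions: the stream of triples A inspects, and the
-- count-until-exit functional both programs compute
def pvTrip (m a b : Int) : Nat → List (List Int)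
  | 0 => []
  | Nat.succ n => [a, b, PySem.Int.mod (a + b) m] :: pvTrip m b (PySem.Int.mod (a + b) m) n

def pvCS (mir ex : List Int) : List (List Int) → Int
  | [] => 0
  | t :: r => (if t = mir then 1 else 0) + (if t = ex then 0 else pvCS mir ex r)

-- the simple (non-accumulator) form of the generated value list
def pvGenL (m a b : Int) : Nat → List Int
  | 0 => []
  | Nat.succ n => a :: pvGenL m b (PySem.Int.mod (a + b) m) n

-- proof-side structural forms of B's tail-recursive helpers
def pvZip3R : List Int → List Int → List Int → List (List Int)
  | x :: xs, y :: ys, z :: zs => [x, y, z] :: pvZip3R xs ys zs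
  | _, _, _ => []

def pvFIR (pat : List Int) : List (List Int) → Option Nat
  | [] => none
  | t :: rest => if t = pat then some 0 else (pvFIR pat rest).map (· + 1)

lemma pvZip3Go_eq : ∀ (xs ys zs : List Int) (acc : List (List Int)),
    pvZip3Go xs ys zs acc = acc.reverse ++ pvZip3R xs ys zs := by
  intro xs
  induction xs with
  | nil => intro ys zs acc; cases ys <;> cases zs <;> simp [pvZip3Go, pvZip3R]
  | cons x xs ih =>
    intro ys zs acc
    cases ys with
    | nil => simp [pvZip3Go, pvZip3R]
    | cons y ys =>
      cases zs with
      | nil => simp [pvZip3Go, pvZip3R]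
      | cons z zs => simp [pvZip3Go, pvZip3R, ih]

lemma pvZip3_eq (xs ys zs : List Int) : pvZip3 xs ys zs = pvZip3R xs ys zs := by
  simp [pvZip3, pvZip3Go_eq]

lemma pvFIGo_eq (pat : List Int) : ∀ (l : List (List Int)) (i : Nat),
    pvFIGo l pat i = (pvFIR pat l).map (· + i) := by
  intro l
  induction l with
  | nil => intro i; simp [pvFIGo, pvFIR]
  | cons t rest ih =>
    intro i
    by_cases h : t = pat
    · simp [pvFIGo, pvFIR, h]
    · simp only [pvFIGo, pvFIR, if_neg h, ih, Option.map_map]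
      cases pvFIR pat rest <;> simp <;> omega

lemma pvFirstIndex_eq (l : List (List Int)) (pat : List Int) :
    pvFirstIndex l pat = pvFIR pat l := by
  simp [pvFirstIndex, pvFIGo_eq]

lemma pvALoop_eq_cs (m : Int) : ∀ (n : Nat) (a b mirror : Int),
    pvALoop m a b n mirror = mirror + pvCS [1, m - 1, 0] [m - 1, 1, 0] (pvTrip m a b n) := by
  intro n
  induction n with
  | zero => intro a b mirror; simp [pvALoop, pvTrip, pvCS]
  | succ n ih =>
    intro a b mirror
    simp only [pvALoop, pvTrip, pvCS]
    split_ifs with hex hmir hmir <;> simp [ih] <;> try ring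

lemma pvGenV_eq (m : Int) : ∀ (n : Nat) (a b : Int) (acc : List Int),
    pvGenV m a b n acc = acc.reverse ++ pvGenL m a b n := by
  intro n
  induction n with
  | zero => intro a b acc; simp [pvGenV, pvGenL]
  | succ n ih =>
    intro a b acc
    simp [pvGenV, pvGenL, ih]

lemma pvZip3_gen (m : Int) : ∀ (n : Nat) (a b : Int),
    pvZip3R (pvGenL m a b (n + 2))
           (pvGenL m b (PySem.Int.mod (a + b) m) (n + 1))
           (pvGenL m (PySem.Int.mod (a + b) m) (PySem.Int.mod (b + PySem.Int.mod (a + b) m) m) n)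
      = pvTrip m a b n := by
  intro n
  induction n with
  | zero => intro a b; simp [pvGenL, pvZip3R, pvTrip]
  | succ n ih =>
    intro a b
    exact congrArg (List.cons [a, b, PySem.Int.mod (a + b) m]) (ih b (PySem.Int.mod (a + b) m))

lemma pvFI_some (mir ex : List Int) : ∀ (l : List (List Int)) (i : Nat),
    pvFIR ex l = some i → ((l.take (i + 1)).count mir : Int) = pvCS mir ex l := by
  intro l
  induction l with
  | nil => intro i h; simp [pvFIR] at h
  | cons t rest ih =>
    intro i h
    by_cases hex : t = ex
    · simp only [pvFIR, if_pos hex, Option.some.injEq] at h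
      subst h; subst hex
      by_cases h2 : t = mir <;> simp [pvCS, h2]
    · simp only [pvFIR, if_neg hex, Option.map_eq_some_iff] at h
      obtain ⟨j, hj, rfl⟩ := h
      have := ih j hj
      by_cases hmir : t = mir
      · have hne : ¬ mir = ex := hmir ▸ hex
        simp [pvCS, hmir, hne, ← this]
        ring
      · simp [pvCS, hex, hmir, ← this]

lemma pvFI_none (mir ex : List Int) : ∀ (l : List (List Int)),
    pvFIR ex l = none → ((l.count mir : Int)) = pvCS mir ex l := by
  intro l
  induction l with
  | nil => intro _; simp [pvCS]
  | cons t rest ih =>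
    intro h
    by_cases hex : t = ex
    · simp [pvFIR, hex] at h
    · simp only [pvFIR, if_neg hex, Option.map_eq_none_iff] at h
      have := ih h
      by_cases hmir : t = mir
      · have hne : ¬ mir = ex := hmir ▸ hex
        simp [pvCS, hmir, hne, ← this]
        ring
      · simp [pvCS, hex, hmir, ← this]

lemma pvCount_eq_cs (mir ex : List Int) (l : List (List Int)) :
    ((l.take ((match pvFIR ex l with | some i => i | none => l.length - 1) + 1)).count mir : Int)
      = pvCS mir ex l := by
  cases h : pvFIR ex l with
  | some i => simpa [h] using pvFI_some mir ex l i h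
  | none =>
    cases l with
    | nil => simp [pvCS]
    | cons t rest =>
      have hlen : (t :: rest).length - 1 + 1 = (t :: rest).length := by simp
      simp only [hlen, List.take_length]
      exact pvFI_none mir ex (t :: rest) h

-- ===== VERDICT (by name: the statement is the Claim_ definition above) =====
theorem pisano_mirror_spec : Claim_equal_pisano_mirror := by
  intro m _ _
  show pisano_mirror m = pisano_mirror_alt m
  unfold pisano_mirror pisano_mirror_alt
  rw [pvALoop_eq_cs, pvGenV_eq]
  simp only [List.reverse_nil, List.nil_append]
  have hd1 : (pvGenL m 0 1 100001).drop 1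
      = pvGenL m 1 (PySem.Int.mod (0 + 1) m) 100000 := rfl
  have hd2 : (pvGenL m 0 1 100001).drop 2
      = pvGenL m (PySem.Int.mod (0 + 1) m)
          (PySem.Int.mod (1 + PySem.Int.mod (0 + 1) m) m) 99999 := rfl
  have hz : pvZip3R (pvGenL m 0 1 100001)
        (pvGenL m 1 (PySem.Int.mod (0 + 1) m) 100000)
        (pvGenL m (PySem.Int.mod (0 + 1) m)
          (PySem.Int.mod (1 + PySem.Int.mod (0 + 1) m) m) 99999)
      = pvTrip m 0 1 99999 := pvZip3_gen m 99999 0 1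
  rw [hd1, hd2, pvZip3_eq, hz, pvFirstIndex_eq, pvCount_eq_cs]
  ring
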